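-- pv_equiv track=rewrite | github.com/MrBrantCode/unitest_baseline | mut_generate/mist_train_cf/cf_18846/solution.py | find_unique_prime_combinations
-- ===== SOURCE A (Python) =====
-- def is_prime(n):
--     if n <= 1:
--         return False
--     for i in range(2, int(n**0.5) + 1):
--         if n % i == 0:
--             return False
--     return True
--
-- def find_unique_prime_combinations(numbers):
--     combinations = set()
--     n = len(numbers)
--     for i in range(n-2):
--         for j in range(i+1, n-1):
--             for k in range(j+1, n):
--                 combination = [numbers[i], numbers[j], numbers[k]]
--                 if all(map(is_prime, combination)):
--                     combinations.add(tuple(combination))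
--     return combinations
-- ===== SOURCE B (Python) =====
-- def is_prime(n):
--     if n <= 1:
--         return False
--     for i in range(2, int(n**0.5) + 1):
--         if n % i == 0:
--             return False
--     return True
--
-- def _pairs(lst):
--     if not lst:
--         return []
--     first, rest = lst[0], lst[1:]
--     return [(first, c) for c in rest] + _pairs(rest)
--
-- def _triples(lst):
--     if not lst:
--         return []
--     first, rest = lst[0], lst[1:]
--     return [(first,) + p for p in _pairs(rest)] + _triples(rest)
--
-- def find_unique_prime_combinations(numbers):
--     primes = [x for x in numbers if is_prime(x)]
--     return set(_triples(primes))
-- ===== Notes on version B (the rewrite author's own statement) =====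
-- stated objective: faster
-- what changed: B tests primality once per element, filters the list to its primes, and generates the triples of that filtered list by structural recursion (head prepended to the pairs of the tail), instead of A's three nested index loops that run the trial-division primality test on all three members of every candidate triple.
import Mathlib
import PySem

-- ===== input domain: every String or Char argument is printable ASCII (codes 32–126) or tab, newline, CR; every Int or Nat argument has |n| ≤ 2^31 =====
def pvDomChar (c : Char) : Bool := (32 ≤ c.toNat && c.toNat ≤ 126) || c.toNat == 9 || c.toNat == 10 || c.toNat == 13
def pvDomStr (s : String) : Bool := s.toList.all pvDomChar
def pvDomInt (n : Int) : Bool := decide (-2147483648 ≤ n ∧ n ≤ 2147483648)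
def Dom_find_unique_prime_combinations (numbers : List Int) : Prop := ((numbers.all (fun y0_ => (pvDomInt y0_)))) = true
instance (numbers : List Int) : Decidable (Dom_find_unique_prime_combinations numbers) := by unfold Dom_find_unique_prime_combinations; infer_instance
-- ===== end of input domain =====

-- B filters the primes once and generates the triples of the filtered list by structural
-- recursion, instead of A's triple index loops that re-test primality on every triple (objective: faster).

-- ===== PORT A =====
-- is_prime: trial division up to int(n**0.5); on the domain |n| ≤ 2^31 the float sqrt is
-- exact, int(n**0.5) = Nat.sqrt n.toNat (n > 1 there).  The early 'return False' in the
-- Python loop is the short-circuit of List.all.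
def pvIsPrime (n : Int) : Bool :=
  if n ≤ 1 then false
  else (PySem.List.pyRange 2 ((Nat.sqrt n.toNat : Int) + 1) 1).all
    (fun i => !(PySem.Int.mod n i == 0))

-- the indices produced by range(...) are always in range, so numbers[i] is pyGetD with default 0
def find_unique_prime_combinations (numbers : List Int) : List (List Int) :=
  let n : Int := (numbers.length : Int)
  (PySem.List.pyRange 0 (n - 2) 1).foldl (fun s i =>
    (PySem.List.pyRange (i + 1) (n - 1) 1).foldl (fun s j =>
      (PySem.List.pyRange (j + 1) n 1).foldl (fun s k =>
        let comb : List Int :=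
          [PySem.List.pyGetD numbers i 0, PySem.List.pyGetD numbers j 0,
           PySem.List.pyGetD numbers k 0]
        if comb.all pvIsPrime then PySem.Set.add s comb else s) s) s)
    PySem.Set.empty

-- ===== PORT B =====
-- Source B's _pairs: all ordered pairs (by position) of lst, head first, then recurse on the tail
def pvPairs : List Int → List (List Int)
  | [] => []
  | a :: rest => rest.map (fun c => [a, c]) ++ pvPairs rest

-- Source B's _triples: head prepended to each pair of the tail, then the triples of the tail
def pvTriples : List Int → List (List Int)
  | [] => []
  | a :: rest => (pvPairs rest).map (fun p => a :: p) ++ pvTriples rest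

-- Source B: primes = [x for x in numbers if is_prime(x)]; return set(_triples(primes))
def find_unique_prime_combinations_alt (numbers : List Int) : List (List Int) :=
  PySem.Set.ofList (pvTriples (numbers.filter pvIsPrime))

-- ===== PRECONDITION & SPEC =====
def Spec_find_unique_prime_combinations (numbers : List Int) (out : List (List Int)) : Prop := out = find_unique_prime_combinations_alt numbers
instance (numbers : List Int) (out : List (List Int)) : Decidable (Spec_find_unique_prime_combinations numbers out) := by unfold Spec_find_unique_prime_combinations; infer_instance

-- ===== CLAIM (what is proved, stated in full; the proofs are below) =====
def Claim_equal_find_unique_prime_combinations : Prop := ∀ (numbers : List Int), Dom_find_unique_prime_combinations numbers → Spec_find_unique_prime_combinations numbers (find_unique_prime_combinations numbers)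

-- ===== LEMMAS AND PROOFS =====

-- fold over the tails of a list: at each element the body sees the element and the rest of the list
def pvTailsFold {β : Type} (g : β → Int → List Int → β) : List Int → β → β
  | [], s => s
  | a :: r, s => pvTailsFold g r (g s a r)

theorem pvTailsFold_of_short {β : Type} (g : β → Int → List Int → β) (c : ℕ)
    (hg : ∀ s a r, r.length + 1 ≤ c → g s a r = s) :
    ∀ (l : List Int) (s : β), l.length ≤ c → pvTailsFold g l s = s := by
  intro l
  induction l with
  | nil => intro s _; rfl
  | cons a r ih =>
      intro s hl
      simp only [pvTailsFold]
      rw [hg s a r (by simpa using hl), ih s (by simp at hl; omega)]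

-- a loop 'for jj in range(j, len(xs) - c)' whose body reads xs[jj] and (morally) xs[jj+1:]
-- is a fold over the tails of xs.drop j, provided the body is the identity on the last c tails
theorem pv_loop_tails {β : Type} (xs : List Int) (d : Int) (c : ℕ)
    (g : β → Int → List Int → β)
    (hg : ∀ s a r, r.length + 1 ≤ c → g s a r = s) :
    ∀ (m j : ℕ), xs.length - j ≤ m → ∀ (s : β),
      (PySem.List.pyRange (j : Int) ((xs.length : Int) - (c : Int)) 1).foldl
        (fun s jj => g s (PySem.List.pyGetD xs jj d) (xs.drop (jj + 1).toNat)) s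
      = pvTailsFold g (xs.drop j) s := by
  intro m
  induction m with
  | zero =>
      intro j hj s
      have hj' : xs.length ≤ j := by omega
      rw [PySem.List.pyRange_one_eq_nil (by omega), List.drop_eq_nil_of_le hj']
      rfl
  | succ m ih =>
      intro j hj s
      by_cases hjn : xs.length ≤ j
      · rw [PySem.List.pyRange_one_eq_nil (by omega), List.drop_eq_nil_of_le hjn]
        rfl
      · replace hjn : j < xs.length := by omega
        have hdrop : xs.drop j = xs[j] :: xs.drop (j + 1) := List.drop_eq_getElem_cons hjn
        by_cases hlt : (j : Int) < (xs.length : Int) - (c : Int)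
        · rw [PySem.List.pyRange_one_cons hlt, List.foldl_cons]
          have hget : PySem.List.pyGetD xs (j : Int) d = xs[j] := by
            simp [List.getD_eq_getElem?_getD, hjn]
          have hcast : ((j : Int) + 1) = ((j + 1 : ℕ) : Int) := by push_cast; ring
          rw [hcast, ih (j + 1) (by omega)]
          rw [hdrop]
          simp only [pvTailsFold, hget, Int.toNat_natCast]
        · rw [PySem.List.pyRange_one_eq_nil (by omega)]
          simp only [List.foldl_nil]
          rw [pvTailsFold_of_short g c hg (xs.drop j) s (by simp; omega)]

-- the inner pair fold with fixed head a is a fold over the pairs of the list, each prefixed with a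
theorem pv_mid_pairs (a : Int) (step : List (List Int) → List Int → List (List Int)) :
    ∀ (r : List Int) (s : List (List Int)),
      pvTailsFold (fun s b r2 => r2.foldl (fun s c => step s [a, b, c]) s) r s
      = ((pvPairs r).map (fun p => a :: p)).foldl step s := by
  intro r
  induction r with
  | nil => intro s; rfl
  | cons b r2 ih =>
      intro s
      simp only [pvTailsFold, pvPairs, List.map_append, List.foldl_append, List.map_map, ih]
      congr 1
      rw [List.foldl_map]
      rfl

-- the full tails fold collects exactly the structural triples of the list
theorem pv_outer_triples (step : List (List Int) → List Int → List (List Int)) :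
    ∀ (xs : List Int) (s : List (List Int)),
      pvTailsFold (fun s a r => pvTailsFold
          (fun s b r2 => r2.foldl (fun s c => step s [a, b, c]) s) r s) xs s
      = (pvTriples xs).foldl step s := by
  intro xs
  induction xs with
  | nil => intro s; rfl
  | cons a r ih =>
      intro s
      simp only [pvTailsFold, pvTriples, List.foldl_append, ih]
      congr 1
      exact pv_mid_pairs a step r s

-- mapping a prime head onto pairs/triples commutes with the all-prime filter
theorem pv_filter_map_cons (p : Int → Bool) (a : Int) (L : List (List Int)) :
    (L.map (fun l => a :: l)).filter (fun l => l.all p)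
    = if p a then (L.filter (fun l => l.all p)).map (fun l => a :: l) else [] := by
  by_cases ha : p a
  · rw [List.filter_map, if_pos ha]
    congr 1
    apply List.filter_congr
    intro l _
    simp [ha]
  · rw [if_neg ha, List.filter_map, List.map_eq_nil_iff, List.filter_eq_nil_iff]
    intro l _
    simp [ha]

theorem pv_map_pair_filter (p : Int → Bool) (a : Int) (ha : p a = true) (r : List Int) :
    (r.map (fun c => [a, c])).filter (fun l => l.all p) = (r.filter p).map (fun c => [a, c]) := by
  rw [List.filter_map]
  congr 1
  apply List.filter_congr
  intro c _
  simp [ha]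

theorem pv_map_pair_filter_neg (p : Int → Bool) (a : Int) (ha : p a = false) (r : List Int) :
    (r.map (fun c => [a, c])).filter (fun l => l.all p) = [] := by
  rw [List.filter_map, List.map_eq_nil_iff, List.filter_eq_nil_iff]
  intro c _
  simp [ha]

theorem pv_pairs_filter (p : Int → Bool) :
    ∀ (xs : List Int), (pvPairs xs).filter (fun l => l.all p) = pvPairs (xs.filter p) := by
  intro xs
  induction xs with
  | nil => rfl
  | cons a r ih =>
      simp only [pvPairs, List.filter_append, ih, List.filter_cons]
      by_cases ha : p a = true
      · rw [pv_map_pair_filter p a ha, if_pos ha]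
        rfl
      · rw [pv_map_pair_filter_neg p a (by simpa using ha), if_neg ha]
        simp

theorem pv_triples_filter (p : Int → Bool) :
    ∀ (xs : List Int), (pvTriples xs).filter (fun l => l.all p) = pvTriples (xs.filter p) := by
  intro xs
  induction xs with
  | nil => rfl
  | cons a r ih =>
      simp only [pvTriples, List.filter_append, ih, List.filter_cons,
        pv_filter_map_cons, pv_pairs_filter]
      by_cases ha : p a = true
      · rw [if_pos ha, if_pos ha]
        rfl
      · rw [if_neg ha, if_neg ha]
        simp

-- ===== VERDICT (by name: the statement is the Claim_ definition above) =====
theorem find_unique_prime_combinations_spec : Claim_equal_find_unique_prime_combinations := by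
  intro numbers _
  unfold Spec_find_unique_prime_combinations
  unfold find_unique_prime_combinations find_unique_prime_combinations_alt
  dsimp only
  -- abbreviations used only inside this proof
  set P : Int → Bool := pvIsPrime with hP
  have hmid : ∀ (i : Int), 0 ≤ i → ∀ (s : List (List Int)),
      (PySem.List.pyRange (i + 1) ((numbers.length : Int) - 1) 1).foldl (fun s j =>
        (PySem.List.pyRange (j + 1) (numbers.length : Int) 1).foldl (fun s k =>
          if ([PySem.List.pyGetD numbers i 0, PySem.List.pyGetD numbers j 0,
               PySem.List.pyGetD numbers k 0].all P)
          then PySem.Set.add s [PySem.List.pyGetD numbers i 0, PySem.List.pyGetD numbers j 0,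
               PySem.List.pyGetD numbers k 0] else s) s) s
      = pvTailsFold (fun s b r2 => r2.foldl (fun s c =>
          if ([PySem.List.pyGetD numbers i 0, b, c].all P)
          then PySem.Set.add s [PySem.List.pyGetD numbers i 0, b, c] else s) s)
          (numbers.drop (i + 1).toNat) s := by
    intro i hi s
    rw [PySem.List.foldl_congr_mem _ _ (fun s j =>
        (numbers.drop (j + 1).toNat).foldl (fun s c =>
          if ([PySem.List.pyGetD numbers i 0, PySem.List.pyGetD numbers j 0, c].all P)
          then PySem.Set.add s [PySem.List.pyGetD numbers i 0, PySem.List.pyGetD numbers j 0, c]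
          else s) s) s ?_]
    · have h := pv_loop_tails numbers 0 1 (fun s b r2 => r2.foldl (fun s c =>
          if ([PySem.List.pyGetD numbers i 0, b, c].all P)
          then PySem.Set.add s [PySem.List.pyGetD numbers i 0, b, c] else s) s)
          (by intro s a r hr
              have : r = [] := by cases r with
                | nil => rfl
                | cons x t => simp at hr
              subst this; rfl)
          numbers.length (i.toNat + 1) (by omega) s
      have hc1 : ((i.toNat + 1 : ℕ) : Int) = i + 1 := by omega
      have hc2 : ((1 : ℕ) : Int) = (1 : Int) := by norm_num
      have hc3 : (i + 1).toNat = i.toNat + 1 := by omega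
      rw [hc1, hc2] at h
      rw [h, hc3]
    · intro acc j hj
      have hj0 : (0 : Int) ≤ j + 1 := by
        have := (PySem.List.mem_pyRange_one.mp hj).1
        omega
      have h := PySem.List.foldl_pyRange_pyGetD' numbers 0 (fun s c =>
          if ([PySem.List.pyGetD numbers i 0, PySem.List.pyGetD numbers j 0, c].all P)
          then PySem.Set.add s [PySem.List.pyGetD numbers i 0, PySem.List.pyGetD numbers j 0, c]
          else s) acc hj0
      exact h
  rw [PySem.List.foldl_congr_mem _ _ (fun s i =>
      pvTailsFold (fun s b r2 => r2.foldl (fun s c =>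
          if ([PySem.List.pyGetD numbers i 0, b, c].all P)
          then PySem.Set.add s [PySem.List.pyGetD numbers i 0, b, c] else s) s)
        (numbers.drop (i + 1).toNat) s) PySem.Set.empty ?_]
  · have h := pv_loop_tails numbers 0 2 (fun s a r =>
        pvTailsFold (fun s b r2 => r2.foldl (fun s c =>
          if ([a, b, c].all P) then PySem.Set.add s [a, b, c] else s) s) r s)
        (by intro s a r hr
            match r, hr with
            | [], _ => rfl
            | [b], _ => rfl
            | x :: y :: t, hr => simp at hr)
        numbers.length 0 (by omega) PySem.Set.empty
    have hc1 : ((0 : ℕ) : Int) = (0 : Int) := by norm_num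
    have hc2 : ((2 : ℕ) : Int) = (2 : Int) := by norm_num
    rw [hc1, hc2, List.drop_zero] at h
    rw [h]
    rw [pv_outer_triples (fun s t => if t.all P then PySem.Set.add s t else s) numbers
      PySem.Set.empty]
    have hfilt := @List.foldl_filter (List Int) (List (List Int))
      (fun t => t.all P) PySem.Set.add (pvTriples numbers) PySem.Set.empty
    rw [← hfilt, pv_triples_filter P numbers, PySem.Set.ofList_eq_foldl]
    rfl
  · intro acc i hi
    exact hmid i (PySem.List.mem_pyRange_one.mp hi).1 acc
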